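-- pv_equiv track=rewrite | github.com/koeppl/squarechecker | squarechecker.py | compute_prev_encoding
-- ===== SOURCE A (Python) =====
-- def compute_prev_encoding(s):
-- 	"""
-- 	Compute the prev-encoding of a string.
-- 	"""
-- 	prev_indices = {}
-- 	encoding = []
-- 	for i, char in enumerate(s):
-- 		if char in prev_indices:
-- 			encoding.append(i - prev_indices[char])
-- 		else:
-- 			encoding.append(0)
-- 		prev_indices[char] = i
-- 	return encoding
-- ===== SOURCE B (Python) =====
-- def _prev_index(s, i, c):
--     """Index of the last occurrence of c in s[:i], or -1, by backward scan."""
--     j = i - 1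
--     while j >= 0 and s[j] != c:
--         j -= 1
--     return j
--
--
-- def compute_prev_encoding(s):
--     """
--     Compute the prev-encoding of a string.
--     """
--     return [i - j if (j := _prev_index(s, i, c)) >= 0 else 0
--             for i, c in enumerate(s)]
-- ===== Notes on version B (the rewrite author's own statement) =====
-- stated objective: alternative
-- what changed: Replaces the stateful single pass with a last-seen-index dict by a stateless per-position backward scan: each entry is computed independently as the distance to the nearest earlier equal character, no dictionary at all.
import Mathlib
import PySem

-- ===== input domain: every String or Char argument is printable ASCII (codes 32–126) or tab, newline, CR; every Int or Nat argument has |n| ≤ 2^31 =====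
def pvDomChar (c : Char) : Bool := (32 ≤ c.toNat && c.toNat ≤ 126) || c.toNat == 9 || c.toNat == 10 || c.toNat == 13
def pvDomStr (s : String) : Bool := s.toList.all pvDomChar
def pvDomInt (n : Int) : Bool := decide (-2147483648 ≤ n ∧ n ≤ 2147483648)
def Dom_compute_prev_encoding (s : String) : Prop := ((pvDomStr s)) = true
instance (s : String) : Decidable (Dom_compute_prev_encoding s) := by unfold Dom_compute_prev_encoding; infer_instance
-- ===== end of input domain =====

-- B replaces A's stateful dict-of-last-indices pass by a stateless per-position backward
-- scan for the previous equal character (alternative decomposition, not claimed faster).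

-- ===== PORT A =====
def compute_prev_encoding (s : String) : List Int :=
  ((PySem.List.enumerate s.toList 0).foldl
    (fun (st : PySem.Dict Char Int × List Int) ic =>
      let enc := if st.1.contains ic.2
                 then st.2 ++ [ic.1 - st.1.getD ic.2 0]
                 else st.2 ++ [(0 : Int)]
      (st.1.insert ic.2 ic.1, enc))
    (PySem.Dict.empty, ([] : List Int))).2

-- ===== PORT B =====
-- the while loop 'j = i-1; while j >= 0 and s[j] != c: j -= 1; return j' of _prev_index
def prevIndexScan (l : List Char) (c : Char) (j : Int) : Int :=
  if 0 ≤ j ∧ PySem.List.pyGetD l j ' ' ≠ c then prevIndexScan l c (j - 1) else j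
termination_by (j + 1).toNat
decreasing_by omega

def compute_prev_encoding_alt (s : String) : List Int :=
  (PySem.List.enumerate s.toList 0).map
    (fun ic =>
      let j := prevIndexScan s.toList ic.2 (ic.1 - 1)
      if 0 ≤ j then ic.1 - j else 0)

-- ===== PRECONDITION & SPEC =====
def Spec_compute_prev_encoding (s : String) (out : List Int) : Prop := out = compute_prev_encoding_alt s
instance (s : String) (out : List Int) : Decidable (Spec_compute_prev_encoding s out) := by unfold Spec_compute_prev_encoding; infer_instance

-- ===== CLAIM (what is proved, stated in full; the proofs are below) =====
def Claim_equal_compute_prev_encoding : Prop := ∀ (s : String), Dom_compute_prev_encoding s → Spec_compute_prev_encoding s (compute_prev_encoding s)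

-- ===== LEMMAS AND PROOFS =====

-- last index of c in pre, or -1 (proof-only specification function)
def lastIdx : List Char → Char → Int
  | [], _ => -1
  | a :: rest, c =>
    let r := lastIdx rest c
    if 0 ≤ r then r + 1 else if a = c then 0 else -1

-- the common shape both programs compute, prefix by prefix
def specEnc (pre rest : List Char) : List Int :=
  match rest with
  | [] => []
  | a :: rest' =>
    (if 0 ≤ lastIdx pre a then (pre.length : Int) - lastIdx pre a else 0)
      :: specEnc (pre ++ [a]) rest'

lemma lastIdx_append_singleton (pre : List Char) (a c : Char) :
    lastIdx (pre ++ [a]) c = if a = c then (pre.length : Int) else lastIdx pre c := by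
  induction pre with
  | nil => simp [lastIdx]
  | cons x t ih =>
    by_cases hac : a = c
    · subst hac
      have h0 : (0 : Int) ≤ (t.length : Int) := by positivity
      simp [lastIdx, List.cons_append, ih, h0]
    · simp [lastIdx, List.cons_append, ih, hac]

lemma prevIndexScan_eq (l : List Char) (c : Char) (m : Nat) (hm : m ≤ l.length) :
    prevIndexScan l c ((m : Int) - 1) = lastIdx (l.take m) c := by
  induction m with
  | zero =>
    rw [prevIndexScan]
    simp [lastIdx]
  | succ n ih =>
    have hn : n < l.length := by omega
    have hlen : (l.take n).length = n := by simp [hn.le]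
    rw [show ((n + 1 : Nat) : Int) - 1 = (n : Int) by push_cast; ring]
    rw [prevIndexScan]
    have hget : PySem.List.pyGetD l (n : Int) ' ' = l[n] := by
      rw [PySem.List.pyGetD_natCast]
      exact List.getD_eq_getElem l ' ' hn
    rw [hget]
    have htake : l.take (n + 1) = l.take n ++ [l[n]] := by
      rw [List.take_add_one]
      simp [List.getElem?_eq_getElem hn]
    rw [htake, lastIdx_append_singleton]
    by_cases hc : l[n] = c
    · rw [if_neg (by simp [hc]), if_pos hc, hlen]
    · rw [if_pos ⟨Int.natCast_nonneg n, hc⟩, if_neg hc]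
      exact ih (le_of_lt hn)

-- the dict invariant: d records exactly the last index of each char of pre
def DInv (d : PySem.Dict Char Int) (pre : List Char) : Prop :=
  ∀ c, (d.contains c = true → 0 ≤ d.getD c 0 ∧ d.getD c 0 = lastIdx pre c) ∧
       (d.contains c = false → lastIdx pre c = -1)

lemma loopA (rest : List Char) : ∀ (pre : List Char) (d : PySem.Dict Char Int)
    (acc : List Int), DInv d pre →
    ((PySem.List.enumerate rest (pre.length : Int)).foldl
      (fun (st : PySem.Dict Char Int × List Int) ic =>
        let enc := if st.1.contains ic.2
                   then st.2 ++ [ic.1 - st.1.getD ic.2 0]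
                   else st.2 ++ [(0 : Int)]
        (st.1.insert ic.2 ic.1, enc))
      (d, acc)).2 = acc ++ specEnc pre rest := by
  induction rest with
  | nil => intro pre d acc _; simp [PySem.List.enumerate_nil, specEnc]
  | cons a rest' ih =>
    intro pre d acc hinv
    rw [PySem.List.enumerate_cons, List.foldl_cons]
    have hstep : (if d.contains a then acc ++ [(pre.length : Int) - d.getD a 0]
                  else acc ++ [(0 : Int)])
        = acc ++ [if 0 ≤ lastIdx pre a then (pre.length : Int) - lastIdx pre a else 0] := by
      by_cases hc : d.contains a
      · obtain ⟨h0, he⟩ := (hinv a).1 hc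
        rw [if_pos hc, he, if_pos (he ▸ h0)]
      · have hn : lastIdx pre a = -1 := (hinv a).2 (by simpa using hc)
        rw [if_neg hc, hn]
        norm_num
    have hinv' : DInv (d.insert a (pre.length : Int)) (pre ++ [a]) := by
      intro c
      rw [lastIdx_append_singleton]
      by_cases hca : c = a
      · subst hca
        simp [PySem.Dict.contains_insert_self, PySem.Dict.getD_insert_self]
      · have hci : (d.insert a (pre.length : Int)).contains c = d.contains c := by
          rw [PySem.Dict.contains_insert]
          simp [hca]
        rw [hci, PySem.Dict.getD_insert, if_neg hca,
            if_neg (fun h : a = c => hca h.symm)]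
        exact hinv c
    simp only [hstep]
    have hlen : (pre.length : Int) + 1 = ((pre ++ [a]).length : Int) := by
      simp
    calc ((PySem.List.enumerate rest' ((pre.length : Int) + 1)).foldl
          (fun (st : PySem.Dict Char Int × List Int) ic =>
            let enc := if st.1.contains ic.2
                       then st.2 ++ [ic.1 - st.1.getD ic.2 0]
                       else st.2 ++ [(0 : Int)]
            (st.1.insert ic.2 ic.1, enc))
          (d.insert a (pre.length : Int),
           acc ++ [if 0 ≤ lastIdx pre a then (pre.length : Int) - lastIdx pre a else 0])).2
        = (acc ++ [if 0 ≤ lastIdx pre a then (pre.length : Int) - lastIdx pre a else 0])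
            ++ specEnc (pre ++ [a]) rest' := by
          rw [hlen]; exact ih (pre ++ [a]) _ _ hinv'
      _ = acc ++ specEnc pre (a :: rest') := by
          simp [specEnc]

lemma loopB (rest : List Char) : ∀ (pre : List Char),
    (PySem.List.enumerate rest (pre.length : Int)).map
      (fun ic =>
        let j := prevIndexScan (pre ++ rest) ic.2 (ic.1 - 1)
        if 0 ≤ j then ic.1 - j else 0)
    = specEnc pre rest := by
  induction rest with
  | nil => intro pre; simp [PySem.List.enumerate_nil, specEnc]
  | cons a rest' ih =>
    intro pre
    rw [PySem.List.enumerate_cons, List.map_cons]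
    have hm : pre.length ≤ (pre ++ a :: rest').length := by simp
    have hhead : prevIndexScan (pre ++ a :: rest') a ((pre.length : Int) - 1)
        = lastIdx pre a := by
      rw [prevIndexScan_eq _ _ _ hm, List.take_left']
      rfl
    have htail : (PySem.List.enumerate rest' ((pre.length : Int) + 1)).map
        (fun ic =>
          let j := prevIndexScan (pre ++ a :: rest') ic.2 (ic.1 - 1)
          if 0 ≤ j then ic.1 - j else 0) = specEnc (pre ++ [a]) rest' := by
      have h1 : (pre.length : Int) + 1 = ((pre ++ [a]).length : Int) := by simp
      have h2 : pre ++ a :: rest' = (pre ++ [a]) ++ rest' := by simp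
      rw [h1, h2]
      exact ih (pre ++ [a])
    simp only [specEnc, hhead, htail]

-- ===== VERDICT (by name: the statement is the Claim_ definition above) =====
theorem compute_prev_encoding_spec : Claim_equal_compute_prev_encoding := by
  intro s _
  unfold Spec_compute_prev_encoding compute_prev_encoding compute_prev_encoding_alt
  have hinv : DInv PySem.Dict.empty [] := by
    intro c
    simp [PySem.Dict.contains_empty, lastIdx]
  have hA := loopA s.toList [] PySem.Dict.empty [] hinv
  have hB := loopB s.toList []
  simp only [List.length_nil, Int.natCast_zero, List.nil_append] at hA hB
  rw [hA, hB]
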